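-- pv_equiv track=rewrite | github.com/klopesb/trabalho_AASB | src/get_proteins.py | extract_proteins
-- ===== SOURCE A (Python) =====
-- from typing import List
--
-- START_CODON = 'M'  # Start codon.
--
-- STOP_CODON = '_'  # Stop codon.
--
-- def process_stop_codon(proteins, current_protein, active):
--     """
--     Processes the current protein and appends upon encountering a stop codon.
--     Ensures proper resetting for subsequent sequences.
--     """
--     if active:
--         proteins.append(current_protein + STOP_CODON)
--     return '', False
--
-- def extract_proteins(amino_acid_sequence: str) -> List[str]:
--     """
--     Extracts proteins from a sequence of amino acids using start ('M') and stop ('_') codons.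
--     Handles multiple proteins in the sequence, starting new ones when encountering 'M'
--     and ending at '_'.
--
--     :param sequence: A string of amino acids (translated from codons).
--     :return: A list of protein strings extracted from the sequence.
--     """
--     inside_protein = False
--     proteins = []
--     current_protein = ''
--     for amino_acid in amino_acid_sequence:
--         if amino_acid == START_CODON:
--             inside_protein = True
--             current_protein += START_CODON
--         elif amino_acid == STOP_CODON:
--             current_protein, inside_protein = process_stop_codon(proteins, current_protein, inside_protein)
--         elif inside_protein:
--             current_protein += amino_acid
--     return proteins
-- ===== SOURCE B (Python) =====
-- def extract_proteins(amino_acid_sequence):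
--     proteins = []
--     for segment in amino_acid_sequence.split('_')[:-1]:
--         i = segment.find('M')
--         if i != -1:
--             proteins.append(segment[i:] + '_')
--     return proteins
-- ===== Notes on version B (the rewrite author's own statement) =====
-- stated objective: faster
-- what changed: Replaces A's per-character state machine (inside_protein flag, growing current_protein accumulator, helper for the stop codon) by split on the stop codon then take-from-first-start-codon per segment; the traversal is done by the C-level str.split/str.find/slicing instead of a Python-level loop.
import Mathlib
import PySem

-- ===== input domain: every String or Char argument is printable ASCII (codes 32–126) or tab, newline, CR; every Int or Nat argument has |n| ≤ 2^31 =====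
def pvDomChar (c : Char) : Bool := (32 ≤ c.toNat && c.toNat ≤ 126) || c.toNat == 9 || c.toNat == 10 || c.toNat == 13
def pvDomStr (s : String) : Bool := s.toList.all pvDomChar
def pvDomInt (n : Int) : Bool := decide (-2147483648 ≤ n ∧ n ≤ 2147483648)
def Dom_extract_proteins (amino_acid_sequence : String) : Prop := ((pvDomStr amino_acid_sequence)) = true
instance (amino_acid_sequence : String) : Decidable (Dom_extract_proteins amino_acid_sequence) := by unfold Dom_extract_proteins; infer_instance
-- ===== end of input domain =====

-- B replaces A's per-character state machine by split-on-'_' / find-first-'M' / slice; same output, proved equal on all of Dom.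

-- ===== PORT A =====
-- accumulated strings are represented as List Char and converted with String.ofList at the very end
def process_stop_codon (proteins : List (List Char)) (current_protein : List Char) (active : Bool) :
    List (List Char) × List Char × Bool :=
  ((if active then proteins ++ [current_protein ++ ['_']] else proteins), ([] : List Char), false)

def pvStepA (st : Bool × List (List Char) × List Char) (amino_acid : Char) :
    Bool × List (List Char) × List Char :=
  if amino_acid = 'M' then (true, st.2.1, st.2.2 ++ ['M'])
  else if amino_acid = '_' then
    let r := process_stop_codon st.2.1 st.2.2 st.1
    (r.2.2, r.1, r.2.1)
  else if st.1 then (st.1, st.2.1, st.2.2 ++ [amino_acid])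
  else st

def extract_proteins (amino_acid_sequence : String) : List String :=
  ((amino_acid_sequence.toList.foldl pvStepA (false, [], [])).2.1).map String.ofList

-- ===== PORT B =====
def pvStepB (proteins : List (List Char)) (segment : List Char) : List (List Char) :=
  let i := PySem.Chars.find segment ['M']
  if i ≠ -1 then proteins ++ [PySem.Chars.slice segment (some i) none ++ ['_']] else proteins

def extract_proteins_alt (amino_acid_sequence : String) : List String :=
  ((PySem.List.slice (PySem.Chars.splitOn amino_acid_sequence.toList ['_']) none (some (-1))).foldl
      pvStepB []).map String.ofList

-- ===== PRECONDITION & SPEC =====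
def Spec_extract_proteins (amino_acid_sequence : String) (out : List String) : Prop := out = extract_proteins_alt amino_acid_sequence
instance (amino_acid_sequence : String) (out : List String) : Decidable (Spec_extract_proteins amino_acid_sequence out) := by unfold Spec_extract_proteins; infer_instance

-- ===== CLAIM (what is proved, stated in full; the proofs are below) =====
def Claim_equal_extract_proteins : Prop := ∀ (amino_acid_sequence : String), Dom_extract_proteins amino_acid_sequence → Spec_extract_proteins amino_acid_sequence (extract_proteins amino_acid_sequence)

-- ===== LEMMAS AND PROOFS =====

-- split on a single '_' by plain structural recursion (proof-side model of splitOn _ ['_'])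
def splitOne : List Char → List (List Char)
  | [] => [[]]
  | c :: cs => if c = '_' then [] :: splitOne cs else (splitOne cs).modifyHead (c :: ·)

-- A's loop, accumulator-free (proof-side model)
def gA : List Char → Bool → List Char → List (List Char)
  | [], _, _ => []
  | c :: cs, ins, cur =>
    if c = 'M' then gA cs true (cur ++ ['M'])
    else if c = '_' then (if ins then [cur ++ ['_']] else []) ++ gA cs false []
    else gA cs ins (if ins then cur ++ [c] else cur)

def mfix (seg : List Char) : List Char := seg.dropWhile (· ≠ 'M')

def emit (seg : List Char) : List (List Char) :=
  if mfix seg = [] then [] else [mfix seg ++ ['_']]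

lemma splitOne_ne_nil (cs : List Char) : splitOne cs ≠ [] := by
  induction cs with
  | nil => simp [splitOne]
  | cons c cs ih =>
    simp only [splitOne]
    split
    · simp
    · cases h : splitOne cs with
      | nil => exact absurd h ih
      | cons a t => simp

lemma go_spec (cs : List Char) : ∀ (fuel : Nat) (cur : List Char) (acc : List (List Char)),
    cs.length ≤ fuel →
    PySem.Chars.splitOn.go ['_'] fuel cs cur acc
      = acc.reverse ++ (splitOne cs).modifyHead (cur.reverse ++ ·) := by
  induction cs with
  | nil =>
    intro fuel cur acc _
    match fuel with
    | 0 => rw [PySem.Chars.splitOn.go.eq_def]; simp [splitOne]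
    | fuel + 1 => rw [PySem.Chars.splitOn.go.eq_def]; simp [splitOne]
  | cons c cs ih =>
    intro fuel cur acc hle
    match fuel with
    | 0 => simp at hle
    | fuel + 1 =>
      rw [PySem.Chars.splitOn.go.eq_def]
      simp only []
      by_cases hc : c = '_'
      · subst hc
        have hpre : List.isPrefixOf ['_'] ('_' :: cs) = true := by
          simp [List.isPrefixOf]
        rw [if_pos hpre]
        simp only [List.length_cons, List.length_nil, Nat.zero_add, List.drop_succ_cons, List.drop_zero]
        rw [ih fuel [] (cur.reverse :: acc) (by simp only [List.length_cons] at hle; omega)]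
        cases h : splitOne cs with
        | nil => exact absurd h (splitOne_ne_nil cs)
        | cons a t => simp [splitOne, h]
      · have hpre : List.isPrefixOf ['_'] (c :: cs) = false := by
          simp [List.isPrefixOf]
          exact fun h => absurd h.symm hc
        simp only [hpre, Bool.false_eq_true, if_false]
        rw [ih fuel (c :: cur) acc (by simpa using Nat.le_of_succ_le_succ (by simpa using hle))]
        cases h : splitOne cs with
        | nil => exact absurd h (splitOne_ne_nil cs)
        | cons a t => simp [splitOne, h, hc]

lemma splitOn_eq_splitOne (cs : List Char) :
    PySem.Chars.splitOn cs ['_'] = splitOne cs := by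
  rw [PySem.Chars.splitOn, go_spec cs (cs.length + 1) [] [] (by omega)]
  cases h : splitOne cs with
  | nil => exact absurd h (splitOne_ne_nil cs)
  | cons a t => simp [List.modifyHead]

lemma mfix_nil : mfix [] = [] := rfl

lemma mfix_cons_ne {c : Char} (h : c ≠ 'M') (s : List Char) : mfix (c :: s) = mfix s := by
  simp [mfix, List.dropWhile, h]

lemma mfix_cons_M (s : List Char) : mfix ('M' :: s) = 'M' :: s := by
  simp [mfix, List.dropWhile]

lemma emit_cons_ne {c : Char} (h : c ≠ 'M') (s : List Char) : emit (c :: s) = emit s := by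
  simp [emit, mfix_cons_ne h]

lemma mfix_append (cur t : List Char) (h1 : mfix cur = cur) (h2 : cur ≠ []) :
    mfix (cur ++ t) = cur ++ t := by
  cases cur with
  | nil => exact absurd rfl h2
  | cons a l =>
    have ha : a = 'M' := by
      by_contra hne
      have h3 : mfix (a :: l) = mfix l := mfix_cons_ne hne l
      rw [h1] at h3
      have h4 := congrArg List.length h3
      have h5 := List.length_dropWhile_le (fun x => !decide (x = 'M')) l
      simp only [mfix] at h4
      simp at h4
      omega
    subst ha
    simp [mfix]

lemma modifyHead_congr {α : Type} (f g : α → α) (l : List α) (h : ∀ x, f x = g x) :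
    l.modifyHead f = l.modifyHead g := by
  cases l <;> simp [List.modifyHead, h]

-- the first occurrence characterization: drop at find = dropWhile
lemma dropWhile_eq_drop_of_first (seg : List Char) (n : Nat)
    (hpre : ['M'] <+: seg.drop n)
    (hmin : ∀ i < n, ¬ ['M'] <+: seg.drop i) :
    seg.dropWhile (· ≠ 'M') = seg.drop n := by
  induction seg generalizing n with
  | nil =>
    rcases hpre with ⟨t, ht⟩
    simp at ht
  | cons c cs ih =>
    cases n with
    | zero =>
      rcases hpre with ⟨t, ht⟩
      simp at ht
      obtain ⟨rfl, _⟩ := ht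
      simp [List.dropWhile]
    | succ m =>
      have hc : c ≠ 'M' := by
        intro rfl
        exact hmin 0 (Nat.succ_pos m) ⟨cs, rfl⟩
      have : cs.dropWhile (· ≠ 'M') = cs.drop m := by
        apply ih m
        · simpa using hpre
        · intro i hi
          have := hmin (i + 1) (by omega)
          simpa using this
      simp only [ne_eq, decide_not] at this
      simp [List.dropWhile, hc, this]

lemma modifyHead_nil_append (l : List (List Char)) : l.modifyHead (([] : List Char) ++ ·) = l := by
  cases l <;> simp [List.modifyHead]

-- segment[i:] with i = segment.find('M') is dropWhile (· ≠ 'M'), and the branch tests its emptiness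
lemma stepB_eq_emit (proteins : List (List Char)) (seg : List Char) :
    pvStepB proteins seg = proteins ++ emit seg := by
  unfold pvStepB
  by_cases h : PySem.Chars.find seg ['M'] = -1
  · have hni : ¬ ['M'] <:+: seg := (PySem.Chars.find_eq_neg_one_iff seg ['M']).mp h
    have hmem : 'M' ∉ seg := by
      intro hm
      obtain ⟨u, v, rfl⟩ := List.append_of_mem hm
      exact hni ⟨u, v, by simp⟩
    have : mfix seg = [] := by
      simp only [mfix, List.dropWhile_eq_nil_iff]
      intro x hx
      simp
      rintro rfl; exact hmem hx
    simp [h, emit, this]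
  · have hnn : 0 ≤ PySem.Chars.find seg ['M'] := by
      have := PySem.Chars.neg_one_le_find seg ['M']
      omega
    obtain ⟨hpre, hmin⟩ := PySem.Chars.find_spec (s := seg) (sub := ['M']) hnn
    set n : Nat := (PySem.Chars.find seg ['M']).toNat with hn
    have hdrop : mfix seg = seg.drop n := dropWhile_eq_drop_of_first seg n hpre hmin
    have hslice : PySem.List.slice seg (some (PySem.Chars.find seg ['M'])) none = seg.drop n :=
      PySem.List.slice_from _ hnn
    have hne : mfix seg ≠ [] := by
      rw [hdrop]
      rcases hpre with ⟨t, ht⟩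
      intro hnil
      rw [hnil] at ht
      simp at ht
    have hlt : n < seg.length := by
      rcases hpre with ⟨t, ht⟩
      by_contra hge
      rw [List.drop_eq_nil_of_le (by omega)] at ht
      simp at ht
    simp [h, emit, hslice, hdrop, hlt]


-- B's fold is segment-wise emission
lemma foldB (segs : List (List Char)) : ∀ acc : List (List Char),
    segs.foldl pvStepB acc = acc ++ segs.flatMap emit := by
  induction segs with
  | nil => simp
  | cons s t ih => intro acc; simp [List.foldl_cons, stepB_eq_emit, ih, List.flatMap_cons]

-- A's fold in accumulator-free form
lemma foldA (cs : List Char) : ∀ (ins : Bool) (proteins : List (List Char)) (cur : List Char),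
    (cs.foldl pvStepA (ins, proteins, cur)).2.1 = proteins ++ gA cs ins cur := by
  induction cs with
  | nil => intro ins proteins cur; simp [gA]
  | cons c cs ih =>
    intro ins proteins cur
    by_cases hM : c = 'M'
    · subst hM
      simp [List.foldl_cons, pvStepA, gA, ih]
    · by_cases hS : c = '_'
      · subst hS
        cases ins <;>
          simp [List.foldl_cons, pvStepA, process_stop_codon, gA, hM, ih]
      · cases ins <;>
          simp [List.foldl_cons, pvStepA, gA, hM, hS, ih]

lemma dropLast_modifyHead {α : Type} (f : α → α) (l : List α) (h : l ≠ []) :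
    (l.modifyHead f).dropLast = l.dropLast.modifyHead f := by
  match l with
  | [] => exact absurd rfl h
  | [a] => simp
  | a :: b :: t => simp [List.modifyHead, List.dropLast]

lemma flatMap_emit_modifyHead_ne {c : Char} (h : c ≠ 'M') (l : List (List Char)) :
    (l.modifyHead (c :: ·)).flatMap emit = l.flatMap emit := by
  cases l with
  | nil => rfl
  | cons a t => simp [List.modifyHead, emit_cons_ne h]

-- the heart: A's loop equals emission over the split segments
lemma gA_eq (cs : List Char) : ∀ (ins : Bool) (cur : List Char),
    (ins = true → mfix cur = cur ∧ cur ≠ []) → (ins = false → cur = []) →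
    gA cs ins cur = ((splitOne cs).modifyHead (cur ++ ·)).dropLast.flatMap emit := by
  induction cs with
  | nil =>
    intro ins cur _ _
    simp [gA, splitOne, List.modifyHead]
  | cons c cs ih =>
    intro ins cur hins hnotins
    by_cases hM : c = 'M'
    · subst hM
      rw [show gA ('M' :: cs) ins cur = gA cs true (cur ++ ['M']) by simp [gA]]
      rw [ih true (cur ++ ['M'])
        (by
          intro _
          constructor
          · cases ins with
            | false => simp [hnotins rfl, mfix_cons_M]
            | true =>
              obtain ⟨h1, h2⟩ := hins rfl
              exact mfix_append cur ['M'] h1 h2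
          · simp)
        (by simp)]
      have h1 : splitOne ('M' :: cs) = (splitOne cs).modifyHead ('M' :: ·) := by
        simp [splitOne]
      rw [h1, List.modifyHead_modifyHead]
      have h4 : (splitOne cs).modifyHead (fun x => cur ++ ['M'] ++ x)
          = (splitOne cs).modifyHead ((fun x => cur ++ x) ∘ (fun x => 'M' :: x)) :=
        modifyHead_congr _ _ _ (fun x => by simp)
      rw [h4]
    · by_cases hS : c = '_'
      · subst hS
        rw [show gA ('_' :: cs) ins cur
            = (if ins then [cur ++ ['_']] else []) ++ gA cs false [] by simp [gA]]
        rw [ih false [] (by simp) (by simp)]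
        have h1 : splitOne ('_' :: cs) = [] :: splitOne cs := by simp [splitOne]
        rw [h1]
        have h2 : (([] :: splitOne cs).modifyHead (cur ++ ·)) = cur :: splitOne cs := by
          simp [List.modifyHead]
        rw [h2]
        rw [List.dropLast_cons_of_ne_nil (splitOne_ne_nil cs)]
        rw [List.flatMap_cons]
        congr 1
        · cases ins with
          | false => simp [hnotins rfl, emit, mfix_nil]
          | true =>
            obtain ⟨h1', h2'⟩ := hins rfl
            simp [emit, h1', h2']
        · congr 1
          cases h : splitOne cs with
          | nil => exact absurd h (splitOne_ne_nil cs)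
          | cons a t => simp [List.modifyHead]
      · rw [show gA (c :: cs) ins cur = gA cs ins (if ins then cur ++ [c] else cur) by
            simp [gA, hM, hS]]
        have h1 : splitOne (c :: cs) = (splitOne cs).modifyHead (c :: ·) := by
          simp [splitOne, hS]
        rw [h1]
        cases ins with
        | true =>
          obtain ⟨hc1, hc2⟩ := hins rfl
          rw [if_pos rfl]
          rw [ih true (cur ++ [c])
            (by
              intro _
              exact ⟨mfix_append cur [c] hc1 hc2, by simp⟩)
            (by simp)]
          rw [List.modifyHead_modifyHead]
          have h4 : (splitOne cs).modifyHead (fun x => cur ++ [c] ++ x)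
              = (splitOne cs).modifyHead ((fun x => cur ++ x) ∘ (fun x => c :: x)) :=
            modifyHead_congr _ _ _ (fun x => by simp)
          rw [h4]
        | false =>
          rw [if_neg (by simp)]
          rw [hnotins rfl]
          rw [ih false [] (by simp) (by simp)]
          rw [modifyHead_nil_append]
          rw [modifyHead_nil_append]
          rw [dropLast_modifyHead _ _ (splitOne_ne_nil cs)]
          rw [flatMap_emit_modifyHead_ne hM]

-- ===== VERDICT (by name: the statement is the Claim_ definition above) =====
theorem extract_proteins_spec : Claim_equal_extract_proteins := by
  intro s _
  unfold Spec_extract_proteins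
  unfold extract_proteins extract_proteins_alt
  rw [foldA, foldB, splitOn_eq_splitOne]
  rw [PySem.List.slice_to_neg_one]
  rw [gA_eq s.toList false [] (by simp) (by simp)]
  rw [modifyHead_nil_append]
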